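-- pv_equiv track=rewrite | github.com/anggakawa/teledocker | services/api-server/tests/test_sse_proxy.py | _parse_sse_lines
-- ===== SOURCE A (Python) =====
-- SSE_DATA_PREFIX = "data: "
--
-- SSE_DONE_SENTINEL = "[DONE]"
--
-- def _parse_sse_lines(incoming_lines: list[str]) -> list[str]:
--     """Apply the same filtering rules used inside the generate() closures.
--
--     Processes a list of raw SSE lines exactly as the production generator
--     does:
--       1. Skip empty lines and lines that do not start with 'data: '.
--       2. Strip the 'data: ' prefix to get the raw payload.
--       3. Stop on the upstream [DONE] sentinel (do not forward it).
--       4. Yield 'data: {payload}\\n\\n' for every other line.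
--
--     Returns a list of the emitted SSE frames (without the final [DONE] that
--     the finally-block appends — that is tested separately).
--     """
--     emitted_frames: list[str] = []
--
--     for line in incoming_lines:
--         # Rule 1: skip empty lines and non-SSE lines.
--         if not line or not line.startswith(SSE_DATA_PREFIX):
--             continue
--
--         # Strip the prefix — the length of 'data: ' is exactly 6 characters.
--         payload_data = line[6:]
--
--         # Rule 3: stop at the upstream sentinel; do not forward it.
--         if payload_data == SSE_DONE_SENTINEL:
--             break
--
--         # Rule 4: re-emit with exactly one 'data: ' prefix.
--         emitted_frames.append(f"data: {payload_data}\n\n")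
--
--     return emitted_frames
-- ===== SOURCE B (Python) =====
-- SSE_DATA_PREFIX = "data: "
--
-- SSE_DONE_SENTINEL = "[DONE]"
--
--
-- def _parse_sse_lines(incoming_lines: list[str]) -> list[str]:
--     """Boundary-first rewrite: locate the '[DONE]' sentinel line, slice the
--     list up to it, then filter/map the prefix in one comprehension."""
--     try:
--         cutoff = next(i for i, l in enumerate(incoming_lines) if l == "data: [DONE]")
--     except StopIteration:
--         cutoff = len(incoming_lines)
--     prefix = incoming_lines[:cutoff]
--     return [f"data: {l[6:]}\n\n" for l in prefix if l and l.startswith(SSE_DATA_PREFIX)]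
-- ===== Notes on version B (the rewrite author's own statement) =====
-- stated objective: alternative
-- what changed: Replaces the single interleaved scan with break by a sentinel-boundary search (first index of 'data: [DONE]', defaulting to the list length), a slice, and one uniform filter/map comprehension over the prefix.
import Mathlib
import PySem

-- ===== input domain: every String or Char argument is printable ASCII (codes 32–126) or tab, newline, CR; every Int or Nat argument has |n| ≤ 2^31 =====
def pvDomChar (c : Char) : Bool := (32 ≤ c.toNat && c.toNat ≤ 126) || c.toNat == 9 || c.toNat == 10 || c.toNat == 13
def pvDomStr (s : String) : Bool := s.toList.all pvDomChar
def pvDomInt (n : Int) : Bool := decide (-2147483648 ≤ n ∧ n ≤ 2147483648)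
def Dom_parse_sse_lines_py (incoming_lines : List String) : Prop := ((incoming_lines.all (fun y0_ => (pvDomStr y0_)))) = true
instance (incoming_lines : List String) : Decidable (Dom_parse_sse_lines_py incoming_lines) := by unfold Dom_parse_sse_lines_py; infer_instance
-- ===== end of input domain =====

-- B replaces A's single scan-with-break by a sentinel-boundary search, a slice, and one filter/map pass (alternative decomposition, same cost).


-- ===== PORT A =====
-- Literal port of A: one scan, skipping non-data lines, stopping (break) at the sentinel.
def parse_sse_lines_py (incoming_lines : List String) : List String :=
  match incoming_lines with
  | [] => []
  | line :: rest =>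
    if line = "" ∨ PySem.Str.startswith line "data: " = false then
      parse_sse_lines_py rest
    else
      let payload_data := PySem.Str.slice line (some 6) none
      if payload_data = "[DONE]" then []
      else ("data: " ++ payload_data ++ "\n\n") :: parse_sse_lines_py rest

-- ===== PORT B =====
-- Port of B: find the cutoff index of the literal sentinel line, slice, then one filter/map.
def parse_sse_lines_py_alt (incoming_lines : List String) : List String :=
  let cutoff := (incoming_lines.findIdx? (fun l => l == "data: [DONE]")).getD incoming_lines.length
  let pref := PySem.List.slice incoming_lines none (some (cutoff : Int))
  pref.filterMap (fun l =>
    if ¬ l = "" ∧ PySem.Str.startswith l "data: " = true then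
      some ("data: " ++ PySem.Str.slice l (some 6) none ++ "\n\n")
    else none)

-- ===== PRECONDITION & SPEC =====
def Spec_parse_sse_lines_py (incoming_lines : List String) (out : List String) : Prop := out = parse_sse_lines_py_alt incoming_lines
instance (incoming_lines : List String) (out : List String) : Decidable (Spec_parse_sse_lines_py incoming_lines out) := by unfold Spec_parse_sse_lines_py; infer_instance

-- ===== CLAIM (what is proved, stated in full; the proofs are below) =====
def Claim_equal_parse_sse_lines_py : Prop := ∀ (incoming_lines : List String), Dom_parse_sse_lines_py incoming_lines → Spec_parse_sse_lines_py incoming_lines (parse_sse_lines_py incoming_lines)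

-- ===== LEMMAS AND PROOFS =====

-- ===== VERDICT (by name: the statement is the Claim_ definition above) =====
-- a line that starts with "data: " and whose 6-drop is "[DONE]" is exactly the sentinel line
lemma sentinel_char (l : String) (hs : PySem.Str.startswith l "data: " = true) :
    PySem.Str.slice l (some 6) none = "[DONE]" ↔ l = "data: [DONE]" := by
  constructor
  · intro h
    have hp : "data: ".toList <+: l.toList := by
      rw [PySem.Str.startswith_eq] at hs
      exact (PySem.Chars.startswith_iff _ _).1 hs
    obtain ⟨t, ht⟩ := hp
    have hslice : (PySem.Str.slice l (some 6) none).toList = l.toList.drop 6 := by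
      rw [PySem.Str.toList_slice]
      exact PySem.List.slice_from_natCast l.toList 6
    have ht' : l.toList.drop 6 = t := by rw [← ht]; rfl
    have htv : t = "[DONE]".toList := by rw [← ht', ← hslice, h]
    apply String.toList_inj.mp
    rw [← ht, htv]; rfl
  · intro h; subst h; decide

-- B on a non-sentinel head: the head contributes its own frame (or nothing) and the tail recurses
lemma alt_cons_of_not_sentinel (x : String) (rest : List String)
    (hx : ¬ x = "data: [DONE]") :
    parse_sse_lines_py_alt (x :: rest) =
      (if ¬ x = "" ∧ PySem.Str.startswith x "data: " = true then
        ["data: " ++ PySem.Str.slice x (some 6) none ++ "\n\n"] else []) ++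
      parse_sse_lines_py_alt rest := by
  have hpx : (x == "data: [DONE]") = false := by simpa using hx
  unfold parse_sse_lines_py_alt
  rw [List.findIdx?_cons, hpx]
  cases h : rest.findIdx? (fun l => l == "data: [DONE]") with
  | none =>
    simp only [Option.map_none, Option.getD_none, List.length_cons,
      PySem.List.slice_to_natCast, List.take_succ_cons, List.take_length, List.filterMap_cons]
    split_ifs <;> simp_all
  | some i =>
    simp only [Option.map_some, Option.getD_some,
      PySem.List.slice_to_natCast, List.take_succ_cons, List.filterMap_cons]
    split_ifs <;> simp_all

lemma main_eq (xs : List String) : parse_sse_lines_py xs = parse_sse_lines_py_alt xs := by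
  induction xs with
  | nil => rfl
  | cons x rest ih =>
    by_cases hx : x = "data: [DONE]"
    · subst hx
      have hA : parse_sse_lines_py ("data: [DONE]" :: rest) = [] := by
        rw [parse_sse_lines_py]
        have h1 : ¬("data: [DONE]" = "" ∨ PySem.Str.startswith "data: [DONE]" "data: " = false) := by
          decide
        rw [if_neg h1]
        have h2 : PySem.Str.slice "data: [DONE]" (some 6) none = "[DONE]" := by decide
        simp [h2]
      have hB : parse_sse_lines_py_alt ("data: [DONE]" :: rest) = [] := by
        unfold parse_sse_lines_py_alt
        rw [List.findIdx?_cons]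
        have h0 : (("data: [DONE]" : String) == "data: [DONE]") = true := by decide
        simp only [h0, if_true, Option.getD_some]
        rw [PySem.List.slice_to]
        · rfl
        · simp
      rw [hA, hB]
    · rw [alt_cons_of_not_sentinel x rest hx]
      rw [parse_sse_lines_py]
      by_cases hskip : x = "" ∨ PySem.Str.startswith x "data: " = false
      · rw [if_pos hskip, ih]
        rcases hskip with h | h
        · simp [h]
        · simp only [PySem.Str.startswith_eq] at h ⊢
          have h' : PySem.Chars.startswith x.toList ['d', 'a', 't', 'a', ':', ' '] = false := h
          simp [h']
      · push_neg at hskip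
        have hs : PySem.Str.startswith x "data: " = true := by
          cases h : PySem.Str.startswith x "data: " with
          | true => rfl
          | false => exact absurd h hskip.2
        have hpay : ¬ PySem.Str.slice x (some 6) none = "[DONE]" := by
          intro h; exact hx ((sentinel_char x hs).1 h)
        rw [if_neg (by exact fun h => h.elim (fun h1 => hskip.1 h1) (fun h2 => hskip.2 h2)),
          if_neg hpay, if_pos ⟨hskip.1, hs⟩, ih]
        rfl

-- ===== VERDICT (by name: the statement is the Claim_ definition above) =====
theorem parse_sse_lines_py_spec : Claim_equal_parse_sse_lines_py := by
  intro xs _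
  unfold Spec_parse_sse_lines_py
  exact main_eq xs
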